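-- pv_equiv track=rewrite | github.com/RobertCsordas/moeut_training_code | framework/dataset/text/thestack.py | mix_ids
-- ===== SOURCE A (Python) =====
-- def mix_ids(ids):
--     order = list(sorted(ids.keys()))
--     res = []
--     i = 0
--     last_len = -1
--     while last_len != len(res):
--         last_len = len(res)
--
--         for o in order:
--             if i < len(ids[o]):
--                 res.append((o, ids[o][i]))
--         i += 1
--     return res
-- ===== SOURCE B (Python) =====
-- def mix_ids(ids):
--     order = sorted(ids.keys())
--     active = [(o, ids[o]) for o in order if ids[o]]
--     res = []
--     i = 0
--     while active:
--         nxt = []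
--         for o, lst in active:
--             res.append((o, lst[i]))
--             if i + 1 < len(lst):
--                 nxt.append((o, lst))
--         active = nxt
--         i += 1
--     return res
-- ===== Notes on version B (the rewrite author's own statement) =====
-- stated objective: alternative
-- what changed: B sorts the keys once into an active list of non-empty (key, list) pairs and shrinks that list as lists exhaust, instead of rescanning every key (with a dict lookup and length test) on every round as A does.
import Mathlib
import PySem

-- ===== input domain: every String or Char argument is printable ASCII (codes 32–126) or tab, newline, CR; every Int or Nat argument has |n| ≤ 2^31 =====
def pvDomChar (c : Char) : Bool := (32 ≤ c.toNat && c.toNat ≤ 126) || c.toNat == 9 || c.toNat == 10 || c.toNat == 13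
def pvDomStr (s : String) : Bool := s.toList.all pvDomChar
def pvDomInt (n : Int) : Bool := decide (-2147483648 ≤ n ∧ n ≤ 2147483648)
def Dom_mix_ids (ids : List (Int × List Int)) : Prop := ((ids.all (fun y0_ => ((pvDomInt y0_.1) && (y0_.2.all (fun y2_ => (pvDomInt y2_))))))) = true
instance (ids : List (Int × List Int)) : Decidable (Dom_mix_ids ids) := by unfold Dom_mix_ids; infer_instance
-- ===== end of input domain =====

-- B replaces A's rescan of every key on every round by a sorted active list of
-- non-empty (key, list) pairs that shrinks as lists exhaust (alternative algorithm, same result).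

-- ===== PORT A =====
-- upper bound on list lengths; used only as a totality guard (fuel) for the while-loops
def mixMaxLen (xs : List (List Int)) : Nat := xs.foldl (fun a l => max a l.length) 0

-- one pass of A's inner 'for o in order' loop
def mixAround (L : Int → List Int) (i : Nat) (order : List Int) (res : List (Int × Int)) : List (Int × Int) :=
  order.foldl (fun r o => if i < (L o).length then r ++ [(o, (L o).getD i 0)] else r) res

-- A's 'while last_len != len(res)' loop: do a pass; stop when it appended nothing
def mixAloop (L : Int → List Int) (order : List Int) : Nat → Nat → List (Int × Int) → List (Int × Int)
  | 0, _, res => res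
  | fuel+1, i, res =>
      let res' := mixAround L i order res
      if res'.length = res.length then res' else mixAloop L order fuel (i+1) res'

def mix_ids (ids : List (Int × List Int)) : List (Int × Int) :=
  let d := PySem.Dict.ofList ids
  let order := PySem.List.sorted d.keys (fun x => x) false
  mixAloop (fun o => d.getD o []) order (mixMaxLen (order.map (fun o => d.getD o [])) + 1) 0 []

-- ===== PORT B =====
-- B's inner 'for o, lst in active' loop: appends this round to res, keeps unexhausted pairs
def mixBstep (i : Nat) (active : List (Int × List Int)) (res : List (Int × Int)) : List (Int × Int) × List (Int × List Int) :=
  active.foldl (fun st p => (st.1 ++ [(p.1, p.2.getD i 0)], if i + 1 < p.2.length then st.2 ++ [p] else st.2)) (res, [])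

-- B's 'while active' loop
def mixBloop : Nat → Nat → List (Int × List Int) → List (Int × Int) → List (Int × Int)
  | 0, _, _, res => res
  | fuel+1, i, active, res =>
      if active.isEmpty then res
      else
        let st := mixBstep i active res
        mixBloop fuel (i+1) st.2 st.1

def mix_ids_alt (ids : List (Int × List Int)) : List (Int × Int) :=
  let d := PySem.Dict.ofList ids
  let order := PySem.List.sorted d.keys (fun x => x) false
  let active := (order.filter (fun o => decide (0 < (d.getD o []).length))).map (fun o => (o, d.getD o []))
  mixBloop (mixMaxLen (order.map (fun o => d.getD o []))) 0 active []

-- ===== PRECONDITION & SPEC =====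
def Spec_mix_ids (ids : List (Int × List Int)) (out : List (Int × Int)) : Prop := out = mix_ids_alt ids
instance (ids : List (Int × List Int)) (out : List (Int × Int)) : Decidable (Spec_mix_ids ids out) := by unfold Spec_mix_ids; infer_instance

-- ===== CLAIM (what is proved, stated in full; the proofs are below) =====
def Claim_equal_mix_ids : Prop := ∀ (ids : List (Int × List Int)), Dom_mix_ids ids → Spec_mix_ids ids (mix_ids ids)

-- ===== LEMMAS AND PROOFS =====
-- the keys still alive in round i, with their lists, in sorted-key order
def activeOf (L : Int → List Int) (order : List Int) (i : Nat) : List (Int × List Int) :=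
  (order.filter (fun o => decide (i < (L o).length))).map (fun o => (o, L o))

lemma mixRound_eq (L : Int → List Int) (i : Nat) (order : List Int) : ∀ res,
    mixAround L i order res = res ++ (activeOf L order i).map (fun p => (p.1, p.2.getD i 0)) := by
  induction order with
  | nil => intro res; simp [mixAround, activeOf]
  | cons o t ih =>
      intro res
      have step : mixAround L i (o :: t) res =
          mixAround L i t (if i < (L o).length then res ++ [(o, (L o).getD i 0)] else res) := by
        simp [mixAround]
      by_cases h : i < (L o).length
      · simp [step, h, ih, activeOf, List.map_cons]
      · simp [step, h, ih, activeOf]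

lemma mixStep_eq (i : Nat) (active : List (Int × List Int)) : ∀ res acc,
    active.foldl (fun st p => (st.1 ++ [(p.1, p.2.getD i 0)], if i + 1 < p.2.length then st.2 ++ [p] else st.2)) (res, acc)
      = (res ++ active.map (fun p => (p.1, p.2.getD i 0)), acc ++ active.filter (fun p => decide (i + 1 < p.2.length))) := by
  induction active with
  | nil => intro res acc; simp
  | cons p t ih =>
      intro res acc
      rw [List.foldl_cons]
      by_cases h : i + 1 < p.2.length
      · rw [if_pos h, ih]
        simp [h]
      · rw [if_neg h, ih]
        simp [h]

lemma activeOf_succ (L : Int → List Int) (order : List Int) (i : Nat) :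
    activeOf L order (i + 1) = (activeOf L order i).filter (fun p => decide (i + 1 < p.2.length)) := by
  unfold activeOf
  rw [List.filter_map, List.filter_filter]
  congr 1
  apply List.filter_congr
  intro o _
  simp only [Function.comp]
  by_cases h : i + 1 < (L o).length
  · have h' : i < (L o).length := by omega
    simp [h, h']
  · simp [h]

lemma activeOf_nil_iff (L : Int → List Int) (order : List Int) (i : Nat) :
    activeOf L order i = [] ↔ ∀ o ∈ order, (L o).length ≤ i := by
  simp only [activeOf, List.map_eq_nil_iff, List.filter_eq_nil_iff, decide_eq_true_eq, Nat.not_lt]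

lemma mixAloop_succ (L : Int → List Int) (order : List Int) (fuel i : Nat) (res : List (Int × Int)) :
    mixAloop L order (fuel + 1) i res =
      if (mixAround L i order res).length = res.length then mixAround L i order res
      else mixAloop L order fuel (i + 1) (mixAround L i order res) := rfl

lemma mixBloop_succ (fuel i : Nat) (active : List (Int × List Int)) (res : List (Int × Int)) :
    mixBloop (fuel + 1) i active res =
      if active.isEmpty then res
      else mixBloop fuel (i + 1) (mixBstep i active res).2 (mixBstep i active res).1 := rfl

lemma mix_key (L : Int → List Int) (order : List Int) : ∀ (fuel i : Nat),
    (∀ o ∈ order, (L o).length ≤ i + fuel) → ∀ res,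
    mixAloop L order (fuel + 1) i res = mixBloop fuel i (activeOf L order i) res := by
  intro fuel
  induction fuel with
  | zero =>
      intro i h res
      have hact : activeOf L order i = [] := (activeOf_nil_iff L order i).mpr (by intro o ho; have := h o ho; omega)
      rw [mixAloop_succ, mixRound_eq, hact]
      simp [mixBloop]
  | succ f ih =>
      intro i h res
      rw [mixAloop_succ, mixBloop_succ, mixRound_eq]
      by_cases hact : activeOf L order i = []
      · rw [hact]
        simp
      · have hne : (activeOf L order i).map (fun p => (p.1, p.2.getD i 0)) ≠ [] := by
          simp [hact]
        have hlen : (res ++ (activeOf L order i).map (fun p => (p.1, p.2.getD i 0))).length ≠ res.length := by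
          simp only [List.length_append]
          have : 0 < ((activeOf L order i).map (fun p => (p.1, p.2.getD i 0))).length :=
            List.length_pos_iff.mpr hne
          omega
        have hBne : (activeOf L order i).isEmpty = false := by
          simp [hact]
        rw [if_neg hlen, hBne]
        have hstep : mixBstep i (activeOf L order i) res
            = (res ++ (activeOf L order i).map (fun p => (p.1, p.2.getD i 0)), activeOf L order (i + 1)) := by
          rw [mixBstep, mixStep_eq, activeOf_succ]
          simp
        rw [if_neg (by simp), hstep]
        exact ih (i + 1) (by intro o ho; have := h o ho; omega) _

-- ===== VERDICT (by name: the statement is the Claim_ definition above) =====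
theorem mix_ids_spec : Claim_equal_mix_ids := by
  intro ids _
  unfold Spec_mix_ids mix_ids mix_ids_alt
  have h := mix_key (fun o => (PySem.Dict.ofList ids).getD o [])
      (PySem.List.sorted (PySem.Dict.ofList ids).keys (fun x => x) false)
      (mixMaxLen ((PySem.List.sorted (PySem.Dict.ofList ids).keys (fun x => x) false).map
          (fun o => (PySem.Dict.ofList ids).getD o []))) 0
      (by
        intro o ho
        have := (PySem.List.le_foldl_max_nat
            ((PySem.List.sorted (PySem.Dict.ofList ids).keys (fun x => x) false).map
              (fun o => (PySem.Dict.ofList ids).getD o [])) List.length 0).2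
            ((PySem.Dict.ofList ids).getD o []) (List.mem_map_of_mem ho)
        simpa [mixMaxLen] using this) []
  simpa [activeOf] using h
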